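-- pv_equiv track=rewrite | github.com/d-royes/personal-solutions-projects | projects/daily-task-assistant/daily_task_assistant/email/haiku_analyzer.py | is_sensitive_domain
-- ===== SOURCE A (Python) =====
-- SENSITIVE_DOMAINS = frozenset([
--     # Banking
--     "bankofamerica.com", "chase.com", "wellsfargo.com", "citibank.com",
--     "usbank.com", "pnc.com", "capitalone.com", "ally.com", "discover.com",
--     "americanexpress.com", "amex.com", "citi.com", "barclays.com",
--     # Credit Unions
--     "navyfederal.org", "usaa.com", "becu.org",
--     # Investments
--     "fidelity.com", "schwab.com", "vanguard.com", "etrade.com",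
--     "tdameritrade.com", "robinhood.com", "merrilledge.com", "edwardjones.com",
--     # Payments
--     "paypal.com", "venmo.com", "stripe.com", "square.com", "zelle.com",
--     "cashapp.com", "wise.com", "remitly.com",
--     # Government
--     "irs.gov", "ssa.gov", "treasury.gov", "medicare.gov", "va.gov",
--     "usa.gov", "state.gov", "dhs.gov",
--     # Healthcare portals
--     "mychart.com", "healthvault.com", "followmyhealth.com",
--     "patient-portal.com", "myuhc.com", "anthem.com", "cigna.com",
--     "aetna.com", "humana.com", "bluecrossma.com", "bcbs.com",
-- ])
--
-- def is_sensitive_domain(email_address: str) -> bool: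
--     """Check if an email address belongs to a sensitive domain.
--
--     Args:
--         email_address: The sender's email address
--
--     Returns:
--         True if the domain is in the sensitive blocklist
--     """
--     if not email_address or "@" not in email_address:
--         return False
--
--     domain = email_address.lower().split("@")[-1]
--
--     # Direct match
--     if domain in SENSITIVE_DOMAINS:
--         return True
--
--     # Check for subdomains (e.g., mail.chase.com)
--     for sensitive in SENSITIVE_DOMAINS:
--         if domain.endswith(f".{sensitive}"):
--             return True
--
--     return False
-- ===== SOURCE B (Python) =====
-- SENSITIVE_DOMAINS = frozenset([
--     # Banking
--     "bankofamerica.com", "chase.com", "wellsfargo.com", "citibank.com",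
--     "usbank.com", "pnc.com", "capitalone.com", "ally.com", "discover.com",
--     "americanexpress.com", "amex.com", "citi.com", "barclays.com",
--     # Credit Unions
--     "navyfederal.org", "usaa.com", "becu.org",
--     # Investments
--     "fidelity.com", "schwab.com", "vanguard.com", "etrade.com",
--     "tdameritrade.com", "robinhood.com", "merrilledge.com", "edwardjones.com",
--     # Payments
--     "paypal.com", "venmo.com", "stripe.com", "square.com", "zelle.com",
--     "cashapp.com", "wise.com", "remitly.com",
--     # Government
--     "irs.gov", "ssa.gov", "treasury.gov", "medicare.gov", "va.gov",
--     "usa.gov", "state.gov", "dhs.gov",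
--     # Healthcare portals
--     "mychart.com", "healthvault.com", "followmyhealth.com",
--     "patient-portal.com", "myuhc.com", "anthem.com", "cigna.com",
--     "aetna.com", "humana.com", "bluecrossma.com", "bcbs.com",
-- ])
--
--
-- def is_sensitive_domain(email_address: str) -> bool:
--     """Check if an email address belongs to a sensitive domain.
--
--     Instead of scanning the blocklist and testing endswith for each entry,
--     walk the domain itself: the full domain, plus every suffix that starts
--     right after a '.', is looked up in the frozenset.
--     """
--     if not email_address or "@" not in email_address:
--         return False
--
--     domain = email_address.lower().split("@")[-1]
--
--     if domain in SENSITIVE_DOMAINS: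
--         return True
--
--     for i, ch in enumerate(domain):
--         if ch == "." and domain[i + 1:] in SENSITIVE_DOMAINS:
--             return True
--
--     return False
-- ===== Notes on version B (the rewrite author's own statement) =====
-- stated objective: alternative
-- what changed: B walks the domain string itself, testing the full domain and each suffix that begins right after a dot character against the frozenset, instead of A's loop over the whole blocklist doing an endswith per entry.
import Mathlib
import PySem

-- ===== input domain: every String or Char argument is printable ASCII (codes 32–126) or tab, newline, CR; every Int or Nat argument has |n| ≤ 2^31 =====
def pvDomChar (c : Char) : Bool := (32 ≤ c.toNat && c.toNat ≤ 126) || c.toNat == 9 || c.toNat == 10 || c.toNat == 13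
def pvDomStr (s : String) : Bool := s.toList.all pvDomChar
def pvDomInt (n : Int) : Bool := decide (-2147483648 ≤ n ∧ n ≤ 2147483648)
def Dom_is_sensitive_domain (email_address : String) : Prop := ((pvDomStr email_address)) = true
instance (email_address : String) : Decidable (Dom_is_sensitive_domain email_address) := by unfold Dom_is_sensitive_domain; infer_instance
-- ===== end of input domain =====

-- B walks the domain string itself, looking up the full domain and every suffix that
-- starts right after a '.', instead of A's scan over the blocklist with endswith per entry
-- (objective: alternative — input-driven suffix lookups vs blocklist-driven endswith).


-- ===== PORT A =====
-- the module-level frozenset, as the list of its (distinct) literal members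
def SENSITIVE_DOMAINS : List (List Char) := List.map String.toList [
  "bankofamerica.com", "chase.com", "wellsfargo.com", "citibank.com",
  "usbank.com", "pnc.com", "capitalone.com", "ally.com", "discover.com",
  "americanexpress.com", "amex.com", "citi.com", "barclays.com",
  "navyfederal.org", "usaa.com", "becu.org",
  "fidelity.com", "schwab.com", "vanguard.com", "etrade.com",
  "tdameritrade.com", "robinhood.com", "merrilledge.com", "edwardjones.com",
  "paypal.com", "venmo.com", "stripe.com", "square.com", "zelle.com",
  "cashapp.com", "wise.com", "remitly.com",
  "irs.gov", "ssa.gov", "treasury.gov", "medicare.gov", "va.gov",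
  "usa.gov", "state.gov", "dhs.gov",
  "mychart.com", "healthvault.com", "followmyhealth.com",
  "patient-portal.com", "myuhc.com", "anthem.com", "cigna.com",
  "aetna.com", "humana.com", "bluecrossma.com", "bcbs.com"]

def is_sensitive_domain (email_address : String) : Bool :=
  -- if not email_address or "@" not in email_address: return False
  if email_address.toList = [] ∨ ¬ (PySem.Chars.isIn ['@'] email_address.toList = true) then
    false
  else
    -- domain = email_address.lower().split("@")[-1]
    let domain := PySem.List.pyGetD
      (PySem.Chars.splitOn (PySem.Chars.lower email_address.toList) ['@']) (-1) []
    -- direct match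
    if domain ∈ SENSITIVE_DOMAINS then true
    -- for sensitive in SENSITIVE_DOMAINS: if domain.endswith("." + sensitive): return True
    else if SENSITIVE_DOMAINS.any (fun s => PySem.Chars.endswith domain ('.' :: s)) then true
    else false

-- ===== PORT B =====
-- for i, ch in enumerate(domain): if ch == '.' and domain[i+1:] in SENSITIVE_DOMAINS: return True
def scanDotSuffixes : List Char → Bool
  | [] => false
  | c :: rest =>
      if c = '.' ∧ rest ∈ SENSITIVE_DOMAINS then true
      else scanDotSuffixes rest

def is_sensitive_domain_alt (email_address : String) : Bool :=
  if email_address.toList = [] ∨ ¬ (PySem.Chars.isIn ['@'] email_address.toList = true) then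
    false
  else
    let domain := PySem.List.pyGetD
      (PySem.Chars.splitOn (PySem.Chars.lower email_address.toList) ['@']) (-1) []
    if domain ∈ SENSITIVE_DOMAINS then true
    else scanDotSuffixes domain

-- ===== PRECONDITION & SPEC =====
def Spec_is_sensitive_domain (email_address : String) (out : Bool) : Prop := out = is_sensitive_domain_alt email_address
instance (email_address : String) (out : Bool) : Decidable (Spec_is_sensitive_domain email_address out) := by unfold Spec_is_sensitive_domain; infer_instance

-- ===== CLAIM (what is proved, stated in full; the proofs are below) =====
def Claim_equal_is_sensitive_domain : Prop := ∀ (email_address : String), Dom_is_sensitive_domain email_address → Spec_is_sensitive_domain email_address (is_sensitive_domain email_address)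

-- ===== LEMMAS AND PROOFS =====

-- the dot-suffix scan of B finds exactly the domains that A's endswith scan finds
theorem scan_eq_any (d : List Char) :
    scanDotSuffixes d
      = SENSITIVE_DOMAINS.any (fun s => PySem.Chars.endswith d ('.' :: s)) := by
  induction d with
  | nil =>
      simp [scanDotSuffixes, PySem.Chars.endswith_iff]
  | cons c rest ih =>
      simp only [scanDotSuffixes]
      split_ifs with hc
      · refine (List.any_eq_true.mpr ⟨rest, hc.2, ?_⟩).symm
        rw [PySem.Chars.endswith_iff, hc.1]
      · rw [ih, Bool.eq_iff_iff]
        simp only [List.any_eq_true, PySem.Chars.endswith_iff, List.suffix_cons_iff]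
        constructor
        · rintro ⟨s, hs, hsuf⟩; exact ⟨s, hs, Or.inr hsuf⟩
        · rintro ⟨s, hs, h | hsuf⟩
          · obtain ⟨hceq, hreq⟩ := List.cons.inj h
            exact absurd ⟨hceq.symm, hreq ▸ hs⟩ hc
          · exact ⟨s, hs, hsuf⟩

-- ===== VERDICT (by name: the statement is the Claim_ definition above) =====
theorem is_sensitive_domain_spec : Claim_equal_is_sensitive_domain := by
  intro e _
  unfold Spec_is_sensitive_domain is_sensitive_domain is_sensitive_domain_alt
  split_ifs with h
  · rfl
  · simp only [scan_eq_any]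
    split_ifs <;> simp_all
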